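-- pv_equiv track=rewrite | github.com/spaceshipmike/mcpoyle | src/mcpoyle/sync.py | _diff_actions
-- ===== SOURCE A (Python) =====
-- def _diff_actions(label: str, new_entries: dict, managed: dict, dry_run: bool) -> tuple[list[str], bool]:
--     """Compare new vs managed entries and return action descriptions + whether changes exist."""
--     to_add = set(new_entries.keys()) - set(managed.keys())
--     to_remove = set(managed.keys()) - set(new_entries.keys())
--     to_update = {
--         k for k in set(new_entries.keys()) & set(managed.keys())
--         if new_entries[k] != managed[k]
--     }
--
--     if not to_add and not to_remove and not to_update:
--         return [f"{label}: already in sync"], False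
--
--     actions = []
--     for name in sorted(to_add):
--         actions.append(f"  + {name}")
--     for name in sorted(to_remove):
--         actions.append(f"  - {name}")
--     for name in sorted(to_update):
--         actions.append(f"  ~ {name}")
--
--     if dry_run:
--         actions.insert(0, f"{label}: would sync")
--     else:
--         actions.append(f"{label}: synced")
--
--     return actions, True
-- ===== SOURCE B (Python) =====
-- def _diff_actions(label: str, new_entries: dict, managed: dict, dry_run: bool) -> tuple[list[str], bool]:
--     """Merge-join: walk the two sorted key lists with two pointers, like a sorted-merge diff."""
--     nk = sorted(new_entries)
--     mk = sorted(managed)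
--     add, rem, upd = [], [], []
--     i = j = 0
--     while i < len(nk) and j < len(mk):
--         if nk[i] < mk[j]:
--             add.append(nk[i]); i += 1
--         elif mk[j] < nk[i]:
--             rem.append(mk[j]); j += 1
--         else:
--             if new_entries[nk[i]] != managed[nk[i]]:
--                 upd.append(nk[i])
--             i += 1; j += 1
--     add.extend(nk[i:])
--     rem.extend(mk[j:])
--     if not (add or rem or upd):
--         return [f"{label}: already in sync"], False
--     actions = ([f"  + {k}" for k in add]
--                + [f"  - {k}" for k in rem]
--                + [f"  ~ {k}" for k in upd])
--     if dry_run: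
--         actions.insert(0, f"{label}: would sync")
--     else:
--         actions.append(f"{label}: synced")
--     return actions, True
-- ===== Notes on version B (the rewrite author's own statement) =====
-- stated objective: alternative
-- what changed: A classifies keys by hashed set algebra (set difference/intersection) and then sorts each of the three groups; B sorts the two key lists once and computes added/removed/changed by a two-pointer merge-join walk over the sorted lists, with no set operations or membership tests.
import Mathlib
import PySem

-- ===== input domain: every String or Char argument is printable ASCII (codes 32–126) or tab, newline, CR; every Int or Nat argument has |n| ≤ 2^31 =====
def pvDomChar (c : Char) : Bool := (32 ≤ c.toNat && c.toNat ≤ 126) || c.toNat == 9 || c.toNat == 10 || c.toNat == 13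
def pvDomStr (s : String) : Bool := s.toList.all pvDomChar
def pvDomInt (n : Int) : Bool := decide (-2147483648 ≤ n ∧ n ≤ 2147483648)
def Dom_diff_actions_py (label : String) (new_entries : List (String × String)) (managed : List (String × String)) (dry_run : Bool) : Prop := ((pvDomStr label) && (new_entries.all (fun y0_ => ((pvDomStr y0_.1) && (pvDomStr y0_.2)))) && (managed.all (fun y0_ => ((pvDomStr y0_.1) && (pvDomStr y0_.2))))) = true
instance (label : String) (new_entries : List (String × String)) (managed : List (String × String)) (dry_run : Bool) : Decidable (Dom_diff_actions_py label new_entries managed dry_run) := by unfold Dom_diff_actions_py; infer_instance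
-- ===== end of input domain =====

-- B replaces A's hashed set algebra (set difference/intersection, then sorting each group) by a
-- two-pointer merge-join over the two sorted key lists (objective: alternative algorithm, same cost).

-- ===== PORT A =====
def diff_actions_py (label : String) (new_entries : List (String × String)) (managed : List (String × String)) (dry_run : Bool) : List String × Bool :=
  let newKeys := PySem.Set.ofList (new_entries.map (·.1))
  let mgdKeys := PySem.Set.ofList (managed.map (·.1))
  let to_add := PySem.Set.diff newKeys mgdKeys
  let to_remove := PySem.Set.diff mgdKeys newKeys
  let to_update := (PySem.Set.inter newKeys mgdKeys).filter
      (fun k => !((PySem.Dict.mk new_entries).get? k == (PySem.Dict.mk managed).get? k))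
  if to_add.isEmpty && to_remove.isEmpty && to_update.isEmpty then
    ([label ++ ": already in sync"], false)
  else
    let actions : List String := []
    let actions := (PySem.List.sorted to_add (fun x => x) false).foldl (fun acc n => acc ++ ["  + " ++ n]) actions
    let actions := (PySem.List.sorted to_remove (fun x => x) false).foldl (fun acc n => acc ++ ["  - " ++ n]) actions
    let actions := (PySem.List.sorted to_update (fun x => x) false).foldl (fun acc n => acc ++ ["  ~ " ++ n]) actions
    if dry_run then ((label ++ ": would sync") :: actions, true)
    else (actions ++ [label ++ ": synced"], true)

-- ===== PORT B =====
-- the while-loop of Source B as the obvious structural recursion on the two sorted key lists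
-- (the trailing 'add.extend(nk[i:])' / 'rem.extend(mk[j:])' are the two base cases)
def pvMergeJoin (new_entries managed : List (String × String)) :
    List String → List String → List String × List String × List String
  | [], mk => ([], mk, [])
  | a :: nk, [] => (a :: nk, [], [])
  | a :: nk, b :: mk =>
    if a < b then
      let r := pvMergeJoin new_entries managed nk (b :: mk)
      (a :: r.1, r.2.1, r.2.2)
    else if b < a then
      let r := pvMergeJoin new_entries managed (a :: nk) mk
      (r.1, b :: r.2.1, r.2.2)
    else
      let r := pvMergeJoin new_entries managed nk mk
      if !((PySem.Dict.mk new_entries).get? a == (PySem.Dict.mk managed).get? a) then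
        (r.1, r.2.1, a :: r.2.2)
      else (r.1, r.2.1, r.2.2)
  termination_by nk mk => nk.length + mk.length

def diff_actions_py_alt (label : String) (new_entries : List (String × String)) (managed : List (String × String)) (dry_run : Bool) : List String × Bool :=
  let nk := PySem.List.sorted (PySem.Set.ofList (new_entries.map (·.1))) (fun x => x) false
  let mk := PySem.List.sorted (PySem.Set.ofList (managed.map (·.1))) (fun x => x) false
  let b := pvMergeJoin new_entries managed nk mk
  if b.1.isEmpty && b.2.1.isEmpty && b.2.2.isEmpty then
    ([label ++ ": already in sync"], false)
  else
    let actions := b.1.map (fun k => "  + " ++ k)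
                   ++ b.2.1.map (fun k => "  - " ++ k)
                   ++ b.2.2.map (fun k => "  ~ " ++ k)
    if dry_run then ((label ++ ": would sync") :: actions, true)
    else (actions ++ [label ++ ": synced"], true)

-- ===== PRECONDITION & SPEC =====
def Spec_diff_actions_py (label : String) (new_entries : List (String × String)) (managed : List (String × String)) (dry_run : Bool) (out : List String × Bool) : Prop := out = diff_actions_py_alt label new_entries managed dry_run
instance (label : String) (new_entries : List (String × String)) (managed : List (String × String)) (dry_run : Bool) (out : List String × Bool) : Decidable (Spec_diff_actions_py label new_entries managed dry_run out) := by unfold Spec_diff_actions_py; infer_instance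

-- ===== CLAIM (what is proved, stated in full; the proofs are below) =====
def Claim_equal_diff_actions_py : Prop := ∀ (label : String) (new_entries : List (String × String)) (managed : List (String × String)) (dry_run : Bool), Dom_diff_actions_py label new_entries managed dry_run → Spec_diff_actions_py label new_entries managed dry_run (diff_actions_py label new_entries managed dry_run)

-- ===== LEMMAS AND PROOFS =====

-- the merge-join over two strictly increasing lists computes the three difference filters
theorem pvMergeJoin_eq (ne md : List (String × String)) (l1 l2 : List String)
    (h1 : l1.Pairwise (· < ·)) (h2 : l2.Pairwise (· < ·)) :
    pvMergeJoin ne md l1 l2 =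
      (l1.filter (fun k => !decide (k ∈ l2)),
       l2.filter (fun k => !decide (k ∈ l1)),
       l1.filter (fun k => decide (k ∈ l2) &&
         !((PySem.Dict.mk ne).get? k == (PySem.Dict.mk md).get? k))) := by
  fun_induction pvMergeJoin ne md l1 l2 with
  | case1 mk => simp
  | case2 a nk => simp
  | case3 a nk b mk hab r ih =>
    obtain ⟨-, hnk⟩ := List.pairwise_cons.mp h1
    have ha : ∀ z ∈ b :: mk, a < z := by
      intro z hz
      rcases List.mem_cons.mp hz with rfl | hz
      · exact hab
      · exact lt_trans hab ((List.pairwise_cons.mp h2).1 z hz)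
    have ha' : a ∉ b :: mk := fun h => lt_irrefl a (ha a h)
    have hane : ¬a = b ∧ a ∉ mk := by simpa [List.mem_cons] using ha'
    simp only [r]
    rw [ih hnk h2]
    simp only [Prod.mk.injEq]
    refine ⟨?_, ?_, ?_⟩
    · simp [List.mem_cons, hane.1, hane.2]
    · exact (List.filter_congr (fun z hz => by simp [List.mem_cons, (ha z hz).ne'])).symm
    · simp [List.mem_cons, hane.1, hane.2]
  | case4 a nk b mk hab hba r ih =>
    obtain ⟨-, hmk⟩ := List.pairwise_cons.mp h2
    have hb : ∀ z ∈ a :: nk, b < z := by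
      intro z hz
      rcases List.mem_cons.mp hz with rfl | hz
      · exact hba
      · exact lt_trans hba ((List.pairwise_cons.mp h1).1 z hz)
    have hb' : b ∉ a :: nk := fun h => lt_irrefl b (hb b h)
    have hbne : ¬b = a ∧ b ∉ nk := by simpa [List.mem_cons] using hb'
    simp only [r]
    rw [ih h1 hmk]
    simp only [Prod.mk.injEq]
    refine ⟨?_, ?_, ?_⟩
    · exact (List.filter_congr (fun z hz => by simp [List.mem_cons, (hb z hz).ne'])).symm
    · simp [List.mem_cons, hbne.1, hbne.2]
    · exact (List.filter_congr (fun z hz => by simp [List.mem_cons, (hb z hz).ne'])).symm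
  | case5 a nk b mk hab hba r hd ih =>
    have heq : a = b := le_antisymm (not_lt.mp hba) (not_lt.mp hab)
    subst heq
    obtain ⟨ha1, hnk⟩ := List.pairwise_cons.mp h1
    obtain ⟨ha2, hmk⟩ := List.pairwise_cons.mp h2
    simp only [r]
    rw [ih hnk hmk]
    simp only [Prod.mk.injEq]
    refine ⟨?_, ?_, ?_⟩
    · rw [List.filter_cons, if_neg (by simp [List.mem_cons])]
      exact (List.filter_congr (fun z hz => by simp [List.mem_cons, (ha1 z hz).ne'])).symm
    · rw [List.filter_cons, if_neg (by simp [List.mem_cons])]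
      exact (List.filter_congr (fun z hz => by simp [List.mem_cons, (ha2 z hz).ne'])).symm
    · rw [List.filter_cons, if_pos (by simp [List.mem_cons, hd])]
      exact congrArg (a :: ·) (List.filter_congr (fun z hz => by simp [List.mem_cons, (ha1 z hz).ne'])).symm
  | case6 a nk b mk hab hba r hd ih =>
    have heq : a = b := le_antisymm (not_lt.mp hba) (not_lt.mp hab)
    subst heq
    obtain ⟨ha1, hnk⟩ := List.pairwise_cons.mp h1
    obtain ⟨ha2, hmk⟩ := List.pairwise_cons.mp h2
    simp only [r]
    rw [ih hnk hmk]
    simp only [Prod.mk.injEq]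
    refine ⟨?_, ?_, ?_⟩
    · rw [List.filter_cons, if_neg (by simp [List.mem_cons])]
      exact (List.filter_congr (fun z hz => by simp [List.mem_cons, (ha1 z hz).ne'])).symm
    · rw [List.filter_cons, if_neg (by simp [List.mem_cons])]
      exact (List.filter_congr (fun z hz => by simp [List.mem_cons, (ha2 z hz).ne'])).symm
    · have hc : ({ items := ne : PySem.Dict String String }.get? a == { items := md : PySem.Dict String String }.get? a) = true := by
        simpa using hd
      rw [List.filter_cons, if_neg (by simp [hc])]
      exact (List.filter_congr (fun z hz => by simp [List.mem_cons, (ha1 z hz).ne'])).symm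

-- name the sorted order of a PySem.Set as a filter of a strictly increasing key list
theorem sorted_set_eq_filter (s keys : List String) (p : String → Bool)
    (hs : s.Nodup) (hk : keys.Pairwise (· < ·))
    (hmem : ∀ x, (x ∈ keys ∧ p x = true) ↔ x ∈ s) :
    PySem.List.sorted s (fun x => x) false = keys.filter p := by
  apply PySem.List.sorted_eq_of_perm_of_pairwise_lt
  · rw [List.perm_ext_iff_of_nodup ((hk.imp fun h => ne_of_lt h).filter p) hs]
    intro a
    rw [List.mem_filter]
    exact hmem a
  · exact hk.filter p

theorem diff_actions_py_spec : Claim_equal_diff_actions_py := by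
  intro label new_entries managed dry_run _
  unfold Spec_diff_actions_py diff_actions_py diff_actions_py_alt
  dsimp only
  have hnk : (PySem.List.sorted (PySem.Set.ofList (new_entries.map (·.1))) (fun x => x) false).Pairwise (· < ·) :=
    PySem.List.sorted_ofList_pairwise_lt (new_entries.map (·.1))
  have hmk : (PySem.List.sorted (PySem.Set.ofList (managed.map (·.1))) (fun x => x) false).Pairwise (· < ·) :=
    PySem.List.sorted_ofList_pairwise_lt (managed.map (·.1))
  rw [pvMergeJoin_eq new_entries managed _ _ hnk hmk]
  have hadd : PySem.List.sorted (PySem.Set.diff (PySem.Set.ofList (new_entries.map (·.1))) (PySem.Set.ofList (managed.map (·.1)))) (fun x => x) false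
      = (PySem.List.sorted (PySem.Set.ofList (new_entries.map (·.1))) (fun x => x) false).filter
          (fun k => !decide (k ∈ PySem.List.sorted (PySem.Set.ofList (managed.map (·.1))) (fun x => x) false)) := by
    apply sorted_set_eq_filter _ _ _ (PySem.Set.nodup_diff _ _ (PySem.Set.nodup_ofList _)) hnk
    intro x
    simp only [PySem.List.mem_sorted, PySem.Set.mem_ofList, PySem.Set.mem_diff,
      Bool.not_eq_eq_eq_not, Bool.not_true, decide_eq_false_iff_not]
  have hrem : PySem.List.sorted (PySem.Set.diff (PySem.Set.ofList (managed.map (·.1))) (PySem.Set.ofList (new_entries.map (·.1)))) (fun x => x) false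
      = (PySem.List.sorted (PySem.Set.ofList (managed.map (·.1))) (fun x => x) false).filter
          (fun k => !decide (k ∈ PySem.List.sorted (PySem.Set.ofList (new_entries.map (·.1))) (fun x => x) false)) := by
    apply sorted_set_eq_filter _ _ _ (PySem.Set.nodup_diff _ _ (PySem.Set.nodup_ofList _)) hmk
    intro x
    simp only [PySem.List.mem_sorted, PySem.Set.mem_ofList, PySem.Set.mem_diff,
      Bool.not_eq_eq_eq_not, Bool.not_true, decide_eq_false_iff_not]
  have hupd : PySem.List.sorted ((PySem.Set.inter (PySem.Set.ofList (new_entries.map (·.1))) (PySem.Set.ofList (managed.map (·.1)))).filter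
        (fun k => !((PySem.Dict.mk new_entries).get? k == (PySem.Dict.mk managed).get? k))) (fun x => x) false
      = (PySem.List.sorted (PySem.Set.ofList (new_entries.map (·.1))) (fun x => x) false).filter
          (fun k => decide (k ∈ PySem.List.sorted (PySem.Set.ofList (managed.map (·.1))) (fun x => x) false) &&
            !((PySem.Dict.mk new_entries).get? k == (PySem.Dict.mk managed).get? k)) := by
    apply sorted_set_eq_filter _ _ _ ((PySem.Set.nodup_inter _ _ (PySem.Set.nodup_ofList _)).filter _) hnk
    intro x
    simp only [List.mem_filter, PySem.List.mem_sorted, PySem.Set.mem_ofList, PySem.Set.mem_inter,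
      Bool.and_eq_true, decide_eq_true_iff]
    tauto
  rw [← hadd, ← hrem, ← hupd]
  have hie : ∀ xs : List String, (PySem.List.sorted xs (fun x => x) false).isEmpty = xs.isEmpty := by
    intro xs
    rw [Bool.eq_iff_iff]
    simp [List.isEmpty_iff, PySem.List.sorted_eq_nil_iff]
  rw [hie, hie, hie]
  split_ifs with h1 h2 <;>
    simp only [PySem.List.foldl_append_singleton_eq_map, List.nil_append, List.append_assoc]
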